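-- pv_equiv track=rewrite | github.com/eyad6789/Bill-to-OriginCertification | word_generator.py | _get_address_part1
-- ===== SOURCE A (Python) =====
-- def _get_address_part1(address: str) -> str:
--     """Get first part of address"""
--     if len(address) <= 60:
--         return address
--     # Find a good break point
--     words = address.split()
--     line = ""
--     for word in words:
--         test = line + (" " if line else "") + word
--         if len(test) > 60:
--             break
--         line = test
--     return line
-- ===== SOURCE B (Python) =====
-- def _get_address_part1(address: str) -> str:
--     """Get first part of address"""
--     if len(address) <= 60:
--         return address
--     words = address.split()
--     # cumulative length of " ".join(words[:k]) for k = 1..len(words)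
--     cum = []
--     total = -1
--     for w in words:
--         total += len(w) + 1
--         cum.append(total)
--     # lengths are strictly increasing: count how many prefixes fit in 60
--     k = sum(1 for c in cum if c <= 60)
--     return " ".join(words[:k])
-- ===== Notes on version B (the rewrite author's own statement) =====
-- stated objective: alternative
-- what changed: Replaces A's grow-a-string-and-break loop by a cumulative prefix-length table (sum of word lengths plus joining spaces), a count of how many prefixes fit in 60, and a single join of that word slice; no intermediate strings are built.
import Mathlib
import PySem

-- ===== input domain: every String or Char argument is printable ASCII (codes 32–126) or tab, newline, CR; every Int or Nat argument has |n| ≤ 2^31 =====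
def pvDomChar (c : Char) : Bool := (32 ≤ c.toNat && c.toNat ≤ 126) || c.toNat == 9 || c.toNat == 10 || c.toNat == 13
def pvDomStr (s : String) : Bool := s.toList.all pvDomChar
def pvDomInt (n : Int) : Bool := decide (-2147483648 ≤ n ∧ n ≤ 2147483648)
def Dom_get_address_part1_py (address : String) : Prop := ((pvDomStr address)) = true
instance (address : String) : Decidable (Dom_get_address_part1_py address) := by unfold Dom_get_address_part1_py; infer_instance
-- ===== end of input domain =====

-- B builds a prefix-length table and joins one slice instead of A's grow-and-break string loop (alternative decomposition, same return value).

-- ===== PORT A =====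
-- the `for word in words: … break` loop of A, line as accumulator
def pvAGo : List (List Char) → List Char → List Char
  | [], line => line
  | w :: ws, line =>
      let test := line ++ (if line.isEmpty then ([] : List Char) else [' ']) ++ w
      if 60 < test.length then line else pvAGo ws test

def get_address_part1_py (address : String) : String :=
  if address.toList.length ≤ 60 then address
  else String.ofList (pvAGo (PySem.Chars.split₀ address.toList) [])

-- ===== PORT B =====
-- Source B's cum-building loop: total starts at -1, total += len(w)+1 per word
def pvCum : List (List Char) → Int → List Int
  | [], _ => []
  | w :: ws, total =>
      let t := total + (w.length : Int) + 1
      t :: pvCum ws t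

def get_address_part1_py_alt (address : String) : String :=
  if address.toList.length ≤ 60 then address
  else
    let words := PySem.Chars.split₀ address.toList
    let cum := pvCum words (-1)
    let k := cum.countP (fun c => c ≤ 60)
    String.ofList (PySem.Chars.join [' '] (words.take k))

-- ===== PRECONDITION & SPEC =====
def Spec_get_address_part1_py (address : String) (out : String) : Prop := out = get_address_part1_py_alt address
instance (address : String) (out : String) : Decidable (Spec_get_address_part1_py address out) := by unfold Spec_get_address_part1_py; infer_instance

-- ===== CLAIM (what is proved, stated in full; the proofs are below) =====
def Claim_equal_get_address_part1_py : Prop := ∀ (address : String), Dom_get_address_part1_py address → Spec_get_address_part1_py address (get_address_part1_py address)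

-- ===== LEMMAS AND PROOFS =====
theorem mem_pvCum_gt (ws : List (List Char)) (total : Int) (x : Int)
    (hx : x ∈ pvCum ws total) : total < x := by
  induction ws generalizing total with
  | nil => simp [pvCum] at hx
  | cons w ws ih =>
    simp only [pvCum, List.mem_cons] at hx
    rcases hx with h | h
    · omega
    · have := ih _ h; omega

theorem countP_pvCum_eq_takeWhile (ws : List (List Char)) (total : Int) :
    (pvCum ws total).countP (fun c => c ≤ 60) =
      ((pvCum ws total).takeWhile (fun c => c ≤ 60)).length := by
  induction ws generalizing total with
  | nil => simp [pvCum]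
  | cons w ws ih =>
    simp only [pvCum]
    by_cases h : total + (w.length : Int) + 1 ≤ 60
    · simp [h, ih]
    · have hz : (pvCum ws (total + (w.length : Int) + 1)).countP (fun c => c ≤ 60) = 0 := by
        rw [List.countP_eq_zero]
        intro x hx
        have := mem_pvCum_gt _ _ _ hx
        simp only [decide_eq_true_eq]
        omega
      simp [h, hz]

theorem joinSp (w : List Char) (ws : List (List Char)) :
    PySem.Chars.join [' '] (w :: ws) = w ++ (ws.map (fun v => ' ' :: v)).flatten := by
  induction ws generalizing w with
  | nil => simp [PySem.Chars.join_singleton]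
  | cons v vs ih =>
    rw [PySem.Chars.join_cons_cons, ih]
    simp

theorem pvAGo_eq (ws : List (List Char)) (line : List Char) (hline : line ≠ []) :
    pvAGo ws line =
      line ++ ((ws.take ((pvCum ws (line.length : Int)).takeWhile (fun c => c ≤ 60)).length).map
        (fun v => ' ' :: v)).flatten := by
  induction ws generalizing line with
  | nil => simp [pvAGo, pvCum]
  | cons w ws ih =>
    have hne : line.isEmpty = false := by simpa [List.isEmpty_iff] using hline
    have harg : (line ++ (if line.isEmpty then ([] : List Char) else [' ']) ++ w)
        = line ++ (' ' :: w) := by simp [hne]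
    simp only [pvAGo, pvCum]
    rw [harg]
    have hlen : (line ++ (' ' :: w)).length = line.length + w.length + 1 := by
      simp [List.length_append]; omega
    by_cases h : (line.length : Int) + (w.length : Int) + 1 ≤ 60
    · rw [if_neg (by rw [hlen]; omega)]
      have htest : line ++ (' ' :: w) ≠ [] := by simp [hline]
      rw [ih _ htest]
      have hc : ((line ++ (' ' :: w)).length : Int) = (line.length : Int) + (w.length : Int) + 1 := by
        rw [hlen]; push_cast; ring
      rw [hc]
      rw [List.takeWhile_cons_of_pos (by simpa using h)]
      simp [List.append_assoc]
    · rw [if_pos (by rw [hlen]; omega)]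
      rw [List.takeWhile_cons_of_neg (by simpa using h)]
      simp

-- every word produced by split₀ is nonempty (invariant of split₀.go: empty runs are never pushed)
theorem split₀_go_ne_nil (s : List Char) (cur : List Char) (acc : List (List Char))
    (hacc : ∀ w ∈ acc, w ≠ []) :
    ∀ w ∈ PySem.Chars.split₀.go s cur acc, w ≠ [] := by
  induction s generalizing cur acc with
  | nil =>
    intro w hw
    rw [PySem.Chars.split₀.go] at hw
    by_cases hc : cur.isEmpty
    · simp only [hc, if_pos] at hw
      exact hacc _ (List.mem_reverse.mp hw)
    · simp only [hc, Bool.false_eq_true, if_neg, not_false_iff] at hw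
      rw [List.mem_reverse, List.mem_cons] at hw
      rcases hw with h | h
      · subst h
        simp only [List.isEmpty_iff] at hc
        simp [hc]
      · exact hacc _ h
  | cons c rest ih =>
    intro w hw
    rw [PySem.Chars.split₀.go] at hw
    by_cases hs : PySem.Chars.isspace c
    · by_cases hc : cur.isEmpty
      · simp only [hs, hc, if_pos] at hw
        exact ih [] acc hacc w hw
      · simp only [hs, hc, Bool.false_eq_true, if_neg, not_false_iff, if_pos] at hw
        refine ih [] (cur.reverse :: acc) ?_ w hw
        intro v hv
        rcases List.mem_cons.mp hv with h | h
        · subst h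
          simp only [List.isEmpty_iff] at hc
          simp [hc]
        · exact hacc _ h
    · simp only [hs, Bool.false_eq_true, if_neg, not_false_iff] at hw
      exact ih (c :: cur) acc hacc w hw

theorem split₀_ne_nil (s : List Char) : ∀ w ∈ PySem.Chars.split₀ s, w ≠ [] := by
  intro w hw
  exact split₀_go_ne_nil s [] [] (by simp) w hw

-- ===== VERDICT (by name: the statement is the Claim_ definition above) =====
theorem get_address_part1_py_spec : Claim_equal_get_address_part1_py := by
  intro address _
  unfold Spec_get_address_part1_py get_address_part1_py get_address_part1_py_alt
  by_cases hlen : address.toList.length ≤ 60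
  · rw [if_pos hlen, if_pos hlen]
  · rw [if_neg hlen, if_neg hlen]
    simp only []
    congr 1
    cases hwords : PySem.Chars.split₀ address.toList with
    | nil => simp [pvAGo, pvCum, PySem.Chars.join_nil]
    | cons w ws =>
      have hw : w ≠ [] := split₀_ne_nil _ _ (hwords ▸ List.mem_cons_self ..)
      have harg0 : (([] : List Char) ++ (if ([] : List Char).isEmpty then ([] : List Char) else [' ']) ++ w) = w := by simp
      simp only [pvAGo, pvCum]
      rw [harg0]
      have ht1 : (-1 : Int) + (w.length : Int) + 1 = (w.length : Int) := by ring
      rw [ht1]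
      by_cases h : 60 < w.length
      · rw [if_pos h]
        have hcz : ((w.length : Int) :: pvCum ws (w.length : Int)).countP (fun c => c ≤ 60) = 0 := by
          rw [List.countP_eq_zero]
          intro x hx
          simp only [List.mem_cons] at hx
          simp only [decide_eq_true_eq]
          rcases hx with hx | hx
          · omega
          · have := mem_pvCum_gt _ _ _ hx; omega
        rw [hcz]
        simp [PySem.Chars.join_nil]
      · rw [if_neg h, pvAGo_eq ws w hw]
        have hcp : ((w.length : Int) :: pvCum ws (w.length : Int)).countP (fun c => c ≤ 60)
            = ((pvCum ws (w.length : Int)).takeWhile (fun c => c ≤ 60)).length + 1 := by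
          rw [List.countP_cons, countP_pvCum_eq_takeWhile]
          simp only [decide_eq_true_eq]
          rw [if_pos (by omega)]
        rw [hcp, List.take_succ_cons, joinSp]
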